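-- pv_equiv track=rewrite | github.com/gyogy/haxx | fractions/sort_fractions.py | sort_norm_fractions
-- ===== SOURCE A (Python) =====
-- def sort_norm_fractions(fractions, key):
--
-- 	sorted_norm_fractions = []
-- 	sorted_key = []
-- 	normalized_nominators = [fractions[i][0] for i in range(len(fractions))]
--
-- 	for i in sorted(normalized_nominators):
--
-- 		for j in fractions:
--
-- 			if j[0] == i:
-- 				sorted_norm_fractions.append(j)
-- 				sorted_key.append(key[fractions.index(j)])
--
-- 	return sorted_norm_fractions, sorted_key
-- ===== SOURCE B (Python) =====
-- def sort_norm_fractions(fractions, key):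
--     # one pass groups each row with its key by leading nominator,
--     # then the groups are emitted along the sorted nominator list
--     groups = {}
--     for f, k in zip(fractions, key):
--         fs, ks = groups.setdefault(f[0], ([], []))
--         fs.append(f)
--         ks.append(k)
--     sorted_fractions, sorted_key = [], []
--     for nom in sorted(f[0] for f in fractions):
--         fs, ks = groups[nom]
--         sorted_fractions += fs
--         sorted_key += ks
--     return sorted_fractions, sorted_key
-- ===== Notes on version B (the rewrite author's own statement) =====
-- stated objective: alternative
-- what changed: B trades A's repeated scanning for one indexing pass: it replaces A's rescan of fractions (with a repeated list.index call inside) for every sorted nominator occurrence by one grouping pass over zip(fractions, key) into a nominator->(rows, keys) dict, then emits the groups along the sorted nominator list; Pre_ excludes only inputs where A raises IndexError (an empty row, or a first-occurrence index past the end of key).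
-- intended difference: On inputs containing a duplicated row whose occurrences carry different keys (or whose later occurrence lies past the end of key), A's key[fractions.index(j)] attaches the first occurrence's key to every copy of the row, while B keeps each copy's own positional key, which is the intended row-key pairing. — e.g. on sort_norm_fractions([[1], [1]], [10, 20]): A returns ([[1], [1], [1], [1]], [10, 10, 10, 10]), B returns ([[1], [1], [1], [1]], [10, 20, 10, 20])
import Mathlib
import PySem

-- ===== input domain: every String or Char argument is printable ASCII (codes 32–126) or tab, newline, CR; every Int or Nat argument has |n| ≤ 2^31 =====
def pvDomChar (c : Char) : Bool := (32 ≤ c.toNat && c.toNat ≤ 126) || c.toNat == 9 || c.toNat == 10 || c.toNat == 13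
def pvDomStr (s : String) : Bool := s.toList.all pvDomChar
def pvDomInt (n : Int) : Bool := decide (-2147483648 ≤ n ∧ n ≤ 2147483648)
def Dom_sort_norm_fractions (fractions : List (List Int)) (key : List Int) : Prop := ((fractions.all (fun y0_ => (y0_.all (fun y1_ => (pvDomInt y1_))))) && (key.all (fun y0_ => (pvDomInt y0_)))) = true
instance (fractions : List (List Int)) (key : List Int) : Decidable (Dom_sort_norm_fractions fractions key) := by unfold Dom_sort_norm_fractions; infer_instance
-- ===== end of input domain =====

-- B groups each row with its own key by leading nominator in one pass and emits the groups
-- along the sorted nominator list, instead of A's rescan of fractions (with a list.index call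
-- inside) for every sorted nominator occurrence (objective: alternative).

-- ===== PORT A =====
-- j[0] and key[fractions.index(j)] are ported with total pyGetD forms; Pre_ guarantees
-- the indices are in range (outside Pre_ the Python raises IndexError).
def sort_norm_fractions (fractions : List (List Int)) (key : List Int) : List (List Int) × List Int :=
  let noms := (PySem.List.pyRange 0 (fractions.length : Int) 1).map
      (fun i => PySem.List.pyGetD (PySem.List.pyGetD fractions i []) 0 0)
  (PySem.List.sorted noms (fun x => x) false).foldl
    (fun st i =>
      fractions.foldl
        (fun st j =>
          if PySem.List.pyGetD j 0 0 == i then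
            (st.1 ++ [j],
             st.2 ++ [PySem.List.pyGetD key
               ((((PySem.List.index? fractions j).getD 0 : Nat) : Int)) 0])
          else st) st)
    ([], [])

-- ===== PORT B =====
-- groups[nom] never misses inside Pre_; it is ported with getD (outside Pre_ the Python raises).
def sort_norm_fractions_alt (fractions : List (List Int)) (key : List Int) : List (List Int) × List Int :=
  let groups := (fractions.zip key).foldl
    (fun (d : PySem.Dict Int (List (List Int) × List Int)) fk =>
      let g := d.getD (PySem.List.pyGetD fk.1 0 0) ([], [])
      d.insert (PySem.List.pyGetD fk.1 0 0) (g.1 ++ [fk.1], g.2 ++ [fk.2]))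
    PySem.Dict.empty
  (PySem.List.sorted (fractions.map (fun f => PySem.List.pyGetD f 0 0)) (fun x => x) false).foldl
    (fun st nom =>
      let g := groups.getD nom ([], [])
      (st.1 ++ g.1, st.2 ++ g.2))
    ([], [])

-- ===== PRECONDITION & SPEC =====
-- Pre_ excludes exactly the inputs where A raises IndexError: an empty fraction
-- (fractions[i][0]) or a first-occurrence index reaching past the end of key.
def Pre_sort_norm_fractions (fractions : List (List Int)) (key : List Int) : Prop :=
  (∀ f ∈ fractions, f ≠ []) ∧
  (∀ f ∈ fractions, (PySem.List.index? fractions f).getD 0 < key.length)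
instance (fractions : List (List Int)) (key : List Int) : Decidable (Pre_sort_norm_fractions fractions key) := by unfold Pre_sort_norm_fractions; infer_instance

def pvWitness_sort_norm_fractions : List (List Int) × List Int :=
  ([[3, 1], [1, 2], [3, 5]], [10, 20, 30])

-- On inputs containing a duplicated row whose occurrences carry different keys (or whose later
-- occurrence lies past the end of key), A's key[fractions.index(j)] attaches the FIRST
-- occurrence's key to every copy of the row, while B keeps each copy's own positional key,
-- which is the intended row-key pairing.
def D_sort_norm_fractions (fractions : List (List Int)) (key : List Int) : Prop :=
  ∃ i : Fin fractions.length, ∃ j : Fin fractions.length,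
    (i : Nat) < (j : Nat) ∧ fractions[(i : Nat)] = fractions[(j : Nat)] ∧
      key[(i : Nat)]? ≠ key[(j : Nat)]?
instance (fractions : List (List Int)) (key : List Int) : Decidable (D_sort_norm_fractions fractions key) := by unfold D_sort_norm_fractions; infer_instance

def Spec_sort_norm_fractions (fractions : List (List Int)) (key : List Int) (out : List (List Int) × List Int) : Prop := ¬ D_sort_norm_fractions fractions key → out = sort_norm_fractions_alt fractions key
instance (fractions : List (List Int)) (key : List Int) (out : List (List Int) × List Int) : Decidable (Spec_sort_norm_fractions fractions key out) := by unfold Spec_sort_norm_fractions; infer_instance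

def pvDiffWitness_sort_norm_fractions : List (List Int) × List Int := ([[1], [1]], [10, 20])
def pvDiffWitnessOut_sort_norm_fractions : (List (List Int) × List Int) × (List (List Int) × List Int) :=
  (([[1], [1], [1], [1]], [10, 10, 10, 10]), ([[1], [1], [1], [1]], [10, 20, 10, 20]))

-- ===== CLAIM (what is proved, stated in full; the proofs are below) =====
def Claim_unchanged_sort_norm_fractions : Prop := ∀ (fractions : List (List Int)) (key : List Int), Dom_sort_norm_fractions fractions key → Pre_sort_norm_fractions fractions key → Spec_sort_norm_fractions fractions key (sort_norm_fractions fractions key)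
def Claim_changed_sort_norm_fractions : Prop := Dom_sort_norm_fractions (pvDiffWitness_sort_norm_fractions.1) (pvDiffWitness_sort_norm_fractions.2) ∧ Pre_sort_norm_fractions (pvDiffWitness_sort_norm_fractions.1) (pvDiffWitness_sort_norm_fractions.2) ∧ D_sort_norm_fractions (pvDiffWitness_sort_norm_fractions.1) (pvDiffWitness_sort_norm_fractions.2) ∧ sort_norm_fractions (pvDiffWitness_sort_norm_fractions.1) (pvDiffWitness_sort_norm_fractions.2) = pvDiffWitnessOut_sort_norm_fractions.1 ∧ sort_norm_fractions_alt (pvDiffWitness_sort_norm_fractions.1) (pvDiffWitness_sort_norm_fractions.2) = pvDiffWitnessOut_sort_norm_fractions.2 ∧ pvDiffWitnessOut_sort_norm_fractions.1 ≠ pvDiffWitnessOut_sort_norm_fractions.2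
def Claim_exact_sort_norm_fractions : Prop := ∀ (fractions : List (List Int)) (key : List Int), Dom_sort_norm_fractions fractions key → Pre_sort_norm_fractions fractions key → D_sort_norm_fractions fractions key → sort_norm_fractions fractions key ≠ sort_norm_fractions_alt fractions key

-- ===== LEMMAS AND PROOFS =====

-- the rows of the group for nominator v, in input order
def pvGroup (L : List (List Int)) (v : Int) : List (List Int) :=
  L.filter (fun f => PySem.List.pyGetD f 0 0 == v)

-- the key attached to row f (first-occurrence index into key)
def pvKeyOf (L : List (List Int)) (key : List Int) (f : List Int) : Int :=
  PySem.List.pyGetD key ((((PySem.List.index? L f).getD 0 : Nat) : Int)) 0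

-- B's dict-building step, named for the induction
def pvStepB (d : PySem.Dict Int (List (List Int) × List Int)) (fk : List Int × Int) :
    PySem.Dict Int (List (List Int) × List Int) :=
  let g := d.getD (PySem.List.pyGetD fk.1 0 0) ([], [])
  d.insert (PySem.List.pyGetD fk.1 0 0) (g.1 ++ [fk.1], g.2 ++ [fk.2])

-- A's list comprehension over range(len(fractions)) is just the list of leading nominators
theorem pvNoms_eq (L : List (List Int)) :
    (PySem.List.pyRange 0 (L.length : Int) 1).map
        (fun i => PySem.List.pyGetD (PySem.List.pyGetD L i []) 0 0)
      = L.map (fun f => PySem.List.pyGetD f 0 0) := by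
  have h : (fun i => PySem.List.pyGetD (PySem.List.pyGetD L i []) 0 0)
      = (fun f => PySem.List.pyGetD f 0 0) ∘ (fun i => PySem.List.pyGetD L i []) := rfl
  rw [h, ← List.map_map, PySem.List.map_pyGetD_pyRange_zero']

-- A's inner pass over fractions appends exactly the group for i with its keys
theorem pvInner_eq (fractions : List (List Int)) (key : List Int) (i : Int)
    (st : List (List Int) × List Int) :
    fractions.foldl
      (fun st j =>
        if PySem.List.pyGetD j 0 0 == i then
          (st.1 ++ [j],
           st.2 ++ [PySem.List.pyGetD key
             ((((PySem.List.index? fractions j).getD 0 : Nat) : Int)) 0])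
        else st) st
    = (st.1 ++ pvGroup fractions i, st.2 ++ (pvGroup fractions i).map (pvKeyOf fractions key)) := by
  obtain ⟨a, b⟩ := st
  have hsplit : (fun (st : List (List Int) × List Int) j =>
      if PySem.List.pyGetD j 0 0 == i then
        (st.1 ++ [j],
         st.2 ++ [PySem.List.pyGetD key
           ((((PySem.List.index? fractions j).getD 0 : Nat) : Int)) 0])
      else st)
      = fun st j =>
        ((fun a j => if PySem.List.pyGetD j 0 0 == i then a ++ [j] else a) st.1 j,
         (fun b j => if PySem.List.pyGetD j 0 0 == i then
            b ++ [PySem.List.pyGetD key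
              ((((PySem.List.index? fractions j).getD 0 : Nat) : Int)) 0] else b) st.2 j) := by
    funext st j
    by_cases h : (PySem.List.pyGetD j 0 0 == i) = true <;> simp [h]
  rw [hsplit]
  refine Eq.trans (PySem.List.foldl_prod_mk
      (fun a j => if PySem.List.pyGetD j 0 0 == i then a ++ [j] else a)
      (fun b j => if PySem.List.pyGetD j 0 0 == i then
          b ++ [PySem.List.pyGetD key ((((PySem.List.index? fractions j).getD 0 : Nat)) : Int) 0]
        else b)
      fractions a b) ?_
  rw [PySem.List.foldl_append_if_eq_filter, PySem.List.foldl_append_if]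
  rfl

-- A laid out as one flatMap per output component over the sorted nominators
theorem pvA_eq (fractions : List (List Int)) (key : List Int) :
    sort_norm_fractions fractions key
      = ((PySem.List.sorted (fractions.map (fun f => PySem.List.pyGetD f 0 0)) (fun x => x) false).flatMap
            (pvGroup fractions),
         (PySem.List.sorted (fractions.map (fun f => PySem.List.pyGetD f 0 0)) (fun x => x) false).flatMap
            (fun v => (pvGroup fractions v).map (pvKeyOf fractions key))) := by
  show (PySem.List.sorted ((PySem.List.pyRange 0 (fractions.length : Int) 1).map
        (fun i => PySem.List.pyGetD (PySem.List.pyGetD fractions i []) 0 0)) (fun x => x) false).foldl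
      (fun st i => fractions.foldl (fun st j =>
        if PySem.List.pyGetD j 0 0 == i then
          (st.1 ++ [j],
           st.2 ++ [PySem.List.pyGetD key ((((PySem.List.index? fractions j).getD 0 : Nat)) : Int) 0])
        else st) st) ([], []) = _
  rw [pvNoms_eq]
  rw [PySem.List.foldl_congr_mem _ _ _ _ (fun acc v _ => pvInner_eq fractions key v acc)]
  rw [PySem.List.foldl_prod_mk (f := fun a v => a ++ pvGroup fractions v)
      (g := fun b v => b ++ (pvGroup fractions v).map (pvKeyOf fractions key))]
  rw [PySem.List.foldl_append_eq_flatMap, PySem.List.foldl_append_eq_flatMap]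
  rfl

-- invariant of B's grouping pass: the dict holds, per nominator, the zipped pairs in order
theorem pvBuild_inv (Z : List (List Int × Int)) (v : Int) :
    (Z.foldl pvStepB PySem.Dict.empty).getD v ([], [])
      = ((Z.filter (fun fk => PySem.List.pyGetD fk.1 0 0 == v)).map Prod.fst,
         (Z.filter (fun fk => PySem.List.pyGetD fk.1 0 0 == v)).map Prod.snd) := by
  induction Z using List.reverseRecOn generalizing v with
  | nil => simp [PySem.Dict.getD_empty]
  | append_singleton P fk ih =>
      rw [List.foldl_append, List.foldl_cons, List.foldl_nil, List.filter_append]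
      show (PySem.Dict.insert _ _ _).getD v ([], []) = _
      rw [PySem.Dict.getD_insert]
      by_cases hv : v = PySem.List.pyGetD fk.1 0 0
      · subst hv
        rw [if_pos rfl, ih]
        simp [List.filter]
      · rw [if_neg hv]
        have hb : (PySem.List.pyGetD fk.1 0 0 == v) = false := by
          rw [beq_eq_false_iff_ne]; exact fun h => hv h.symm
        rw [ih]
        simp [List.filter, hb]

-- B laid out as one flatMap per output component over the sorted nominators
theorem pvB_eq (fractions : List (List Int)) (key : List Int) :
    sort_norm_fractions_alt fractions key
      = ((PySem.List.sorted (fractions.map (fun f => PySem.List.pyGetD f 0 0)) (fun x => x) false).flatMap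
            (fun v => ((fractions.zip key).filter (fun fk => PySem.List.pyGetD fk.1 0 0 == v)).map Prod.fst),
         (PySem.List.sorted (fractions.map (fun f => PySem.List.pyGetD f 0 0)) (fun x => x) false).flatMap
            (fun v => ((fractions.zip key).filter (fun fk => PySem.List.pyGetD fk.1 0 0 == v)).map Prod.snd)) := by
  show (PySem.List.sorted (fractions.map (fun f => PySem.List.pyGetD f 0 0)) (fun x => x) false).foldl
      (fun st nom =>
        (st.1 ++ (((fractions.zip key).foldl pvStepB PySem.Dict.empty).getD nom ([], [])).1,
         st.2 ++ (((fractions.zip key).foldl pvStepB PySem.Dict.empty).getD nom ([], [])).2)) ([], []) = _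
  have h1 : (PySem.List.sorted (fractions.map (fun f => PySem.List.pyGetD f 0 0)) (fun x => x) false).foldl
      (fun st nom =>
        (st.1 ++ (((fractions.zip key).foldl pvStepB PySem.Dict.empty).getD nom ([], [])).1,
         st.2 ++ (((fractions.zip key).foldl pvStepB PySem.Dict.empty).getD nom ([], [])).2)) ([], [])
      = (PySem.List.sorted (fractions.map (fun f => PySem.List.pyGetD f 0 0)) (fun x => x) false).foldl
      (fun st nom =>
        (st.1 ++ ((fractions.zip key).filter (fun fk => PySem.List.pyGetD fk.1 0 0 == nom)).map Prod.fst,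
         st.2 ++ ((fractions.zip key).filter (fun fk => PySem.List.pyGetD fk.1 0 0 == nom)).map Prod.snd)) ([], []) :=
    PySem.List.foldl_congr_mem _ _ _ _ (fun acc v _ => by rw [pvBuild_inv])
  rw [h1]
  rw [PySem.List.foldl_prod_mk
      (f := fun a v => a ++ ((fractions.zip key).filter (fun fk => PySem.List.pyGetD fk.1 0 0 == v)).map Prod.fst)
      (g := fun b v => b ++ ((fractions.zip key).filter (fun fk => PySem.List.pyGetD fk.1 0 0 == v)).map Prod.snd)]
  rw [PySem.List.foldl_append_eq_flatMap, PySem.List.foldl_append_eq_flatMap]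
  rfl

-- index? finds the first occurrence: it is at most j, with an equal row there
theorem pvFirstIdx (L : List (List Int)) (j : Nat) (hj : j < L.length) :
    ∃ i0 : Nat, PySem.List.index? L L[j] = some i0 ∧ i0 ≤ j ∧
      ∃ h0 : i0 < L.length, L[i0] = L[j] := by
  have hmem : L[j] ∈ L := List.getElem_mem hj
  obtain ⟨i0, hi0⟩ := Option.isSome_iff_exists.mp ((PySem.List.index?_isSome_iff _ _).mpr hmem)
  refine ⟨i0, hi0, ?_, ?_⟩
  all_goals rw [PySem.List.index?_eq_some_iff] at hi0
  all_goals obtain ⟨pre, suf, hL, hlen, hnotin⟩ := hi0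
  · by_contra hgt
    have hjpre : j < pre.length := by omega
    have : L[j] = pre[j] := by
      rw [List.getElem_of_eq hL hj, List.getElem_append_left hjpre]
    exact hnotin (this ▸ List.getElem_mem hjpre)
  · have h0 : i0 < L.length := by
      rw [hL, List.length_append, List.length_cons]; omega
    refine ⟨h0, ?_⟩
    rw [List.getElem_of_eq hL h0]
    rw [List.getElem_append_right (by omega)]
    simp [hlen]

-- under Pre_, unless D_ holds, key is at least as long as fractions
theorem pvLen (fractions : List (List Int)) (key : List Int)
    (hpre : Pre_sort_norm_fractions fractions key)
    (hD : ¬ D_sort_norm_fractions fractions key) :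
    fractions.length ≤ key.length := by
  by_contra hlt
  have hj : key.length < fractions.length := by omega
  obtain ⟨i0, hidx, hle, h0, heq⟩ := pvFirstIdx fractions key.length hj
  have hi0 : i0 < key.length := by
    have := hpre.2 fractions[key.length] (List.getElem_mem hj)
    rwa [hidx] at this
  exact hD ⟨⟨i0, h0⟩, ⟨key.length, hj⟩, by omega, heq, by
    rw [List.getElem?_eq_getElem hi0, List.getElem?_eq_none (le_refl _)]
    simp⟩

-- without D_, each zipped pair's own key is A's first-occurrence key
theorem pvPair (fractions : List (List Int)) (key : List Int)
    (hlen : fractions.length ≤ key.length)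
    (hD : ¬ D_sort_norm_fractions fractions key) :
    ∀ fk ∈ fractions.zip key, pvKeyOf fractions key fk.1 = fk.2 := by
  intro fk hfk
  obtain ⟨p, hp, hpi⟩ := List.mem_iff_getElem.mp hfk
  have hplt : p < fractions.length := by
    rw [List.length_zip] at hp; omega
  have hpk : p < key.length := by omega
  have hig : (fractions.zip key)[p] = (fractions[p], key[p]) := List.getElem_zip ..
  have hfst : fk.1 = fractions[p] := by rw [← hpi, hig]
  have hsnd : fk.2 = key[p] := by rw [← hpi, hig]
  obtain ⟨i0, hidx, hle, h0, heq⟩ := pvFirstIdx fractions p hplt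
  have hi0k : i0 < key.length := by omega
  have hkeq : key[i0] = key[p] := by
    rcases Nat.lt_or_ge i0 p with hlt | hge
    · by_contra hne
      exact hD ⟨⟨i0, h0⟩, ⟨p, hplt⟩, hlt, heq, by
        rw [List.getElem?_eq_getElem hi0k, List.getElem?_eq_getElem hpk]
        simpa using hne⟩
    · have : i0 = p := by omega
      subst this; rfl
  unfold pvKeyOf
  rw [hfst, hidx]
  simp only [Option.getD_some]
  rw [PySem.List.pyGetD_natCast, hsnd, ← hkeq]
  exact List.getD_eq_getElem key 0 hi0k
-- the zipped groups project to A's groups when key is long enough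
theorem pvFil (fractions : List (List Int)) (key : List Int)
    (hlen : fractions.length ≤ key.length) (v : Int) :
    ((fractions.zip key).filter (fun fk => PySem.List.pyGetD fk.1 0 0 == v)).map Prod.fst
      = pvGroup fractions v := by
  have h := List.filter_map (f := Prod.fst) (l := fractions.zip key)
      (p := fun f => PySem.List.pyGetD f 0 0 == v)
  rw [List.map_fst_zip hlen] at h
  exact h.symm

-- equal flatMaps with componentwise equal lengths have equal components
theorem pvFlatMapInj {α β : Type} (ls : List α) (f g : α → List β)
    (hl : ∀ x ∈ ls, (f x).length = (g x).length)
    (h : ls.flatMap f = ls.flatMap g) : ∀ x ∈ ls, f x = g x := by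
  induction ls with
  | nil => intro x hx; cases hx
  | cons a t ih =>
      rw [List.flatMap_cons, List.flatMap_cons] at h
      have := List.append_inj h (hl a List.mem_cons_self)
      intro x hx
      rcases List.mem_cons.mp hx with rfl | hxt
      · exact this.1
      · exact ih (fun y hy => hl y (List.mem_cons_of_mem a hy)) this.2 x hxt

-- zip only sees the prefix of fractions covered by key
theorem pvZipTake {α β : Type} (l1 : List α) (l2 : List β) :
    l1.zip l2 = (l1.take l2.length).zip l2 := by
  induction l1 generalizing l2 with
  | nil => simp
  | cons a t ih =>
      cases l2 with
      | nil => simp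
      | cons b s => simp [List.zip_cons_cons, ih s]

-- ===== VERDICT proofs =====
theorem sort_norm_fractions_spec : Claim_unchanged_sort_norm_fractions := by
  intro fractions key _ hpre hD
  show sort_norm_fractions fractions key = sort_norm_fractions_alt fractions key
  have hlen := pvLen fractions key hpre hD
  have hpair := pvPair fractions key hlen hD
  rw [pvA_eq, pvB_eq]
  refine Prod.ext ?_ ?_
  · simp only
    refine List.flatMap_congr ?_
    intro v _
    exact (pvFil fractions key hlen v).symm
  · simp only
    refine List.flatMap_congr ?_
    intro v _
    rw [← pvFil fractions key hlen v, List.map_map]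
    refine List.map_congr_left ?_
    intro fk hfk
    exact hpair fk (List.mem_of_mem_filter hfk)

theorem sort_norm_fractions_changed : Claim_changed_sort_norm_fractions := by
  unfold Claim_changed_sort_norm_fractions; decide

theorem sort_norm_fractions_tight : Claim_exact_sort_norm_fractions := by
  intro fractions key _ hpre hD heq
  obtain ⟨i, j, hij, hrow, hkne⟩ := hD
  rcases Nat.lt_or_ge key.length fractions.length with hshort | hlen
  · -- key too short: B drops rows past key, so the first components have different lengths
    have h1 := congrArg (fun p => p.1.length) heq
    rw [pvA_eq, pvB_eq] at h1
    simp only [List.length_flatMap] at h1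
    set S := PySem.List.sorted (fractions.map (fun f => PySem.List.pyGetD f 0 0)) (fun x => x) false with hS
    set m := key.length with hm
    have hzt : fractions.zip key = (fractions.take m).zip key := pvZipTake fractions key
    have htlen : (fractions.take m).length ≤ key.length := by
      rw [List.length_take]; omega
    have hfil : ∀ v, ((fractions.zip key).filter (fun fk => PySem.List.pyGetD fk.1 0 0 == v)).map Prod.fst
        = pvGroup (fractions.take m) v := by
      intro v; rw [hzt]; exact pvFil (fractions.take m) key htlen v
    -- pointwise: the truncated group is never longer, and is strictly shorter at fractions[m]'s nominator
    have hle : ∀ v ∈ S, (((fractions.zip key).filter (fun fk => PySem.List.pyGetD fk.1 0 0 == v)).map Prod.fst).length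
        ≤ (pvGroup fractions v).length := by
      intro v _
      rw [hfil v]
      exact ((List.take_sublist m fractions).filter _).length_le
    have hsplit : pvGroup fractions = fun v => pvGroup (fractions.take m) v ++ (fractions.drop m).filter (fun f => PySem.List.pyGetD f 0 0 == v) := by
      funext v
      unfold pvGroup
      rw [← List.filter_append, List.take_append_drop]
    have hv0mem : PySem.List.pyGetD fractions[m] 0 0 ∈ fractions.map (fun f => PySem.List.pyGetD f 0 0) :=
      List.mem_map.mpr ⟨fractions[m], List.getElem_mem hshort, rfl⟩
    have hv0S : PySem.List.pyGetD fractions[m] 0 0 ∈ S := by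
      rw [hS, PySem.List.mem_sorted]; exact hv0mem
    have hstrict : (((fractions.zip key).filter (fun fk => PySem.List.pyGetD fk.1 0 0 == PySem.List.pyGetD fractions[m] 0 0)).map Prod.fst).length
        < (pvGroup fractions (PySem.List.pyGetD fractions[m] 0 0)).length := by
      rw [hfil, hsplit]
      simp only [List.length_append]
      have hdropne : fractions[m] ∈ (fractions.drop m).filter (fun f => PySem.List.pyGetD f 0 0 == PySem.List.pyGetD fractions[m] 0 0) := by
        refine List.mem_filter.mpr ⟨?_, by simp⟩
        rw [List.drop_eq_getElem_cons hshort]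
        exact List.mem_cons_self
      have : 0 < ((fractions.drop m).filter (fun f => PySem.List.pyGetD f 0 0 == PySem.List.pyGetD fractions[m] 0 0)).length :=
        List.length_pos_of_mem hdropne
      omega
    have := List.sum_lt_sum _ _ hle ⟨_, hv0S, hstrict⟩
    omega
  · -- key long enough: the second components disagree at the duplicated row's group
    have h2 := congrArg Prod.snd heq
    rw [pvA_eq, pvB_eq] at h2
    simp only at h2
    set v := PySem.List.pyGetD fractions[(i : Nat)] 0 0 with hv
    have hvS : v ∈ PySem.List.sorted (fractions.map (fun f => PySem.List.pyGetD f 0 0)) (fun x => x) false := by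
      rw [PySem.List.mem_sorted]
      exact List.mem_map.mpr ⟨fractions[(i : Nat)], List.getElem_mem i.isLt, rfl⟩
    have hblock := pvFlatMapInj _ _ _ (fun w _ => by
        rw [← pvFil fractions key hlen w, List.map_map]
        simp) h2.symm v hvS
    -- hblock : (Z.filter P).map snd = (pvGroup v).map pvKeyOf; rewrite A's side through the zip
    rw [← pvFil fractions key hlen v, List.map_map] at hblock
    have hpt := List.map_inj_left.mp hblock
    have hmemZ : ∀ (p : Nat) (hp : p < fractions.length),
        fractions[p] = fractions[(i : Nat)] →
        (fractions[p], key[p]'(by omega)) ∈ (fractions.zip key).filter (fun fk => PySem.List.pyGetD fk.1 0 0 == v) := by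
      intro p hp hrowp
      refine List.mem_filter.mpr ⟨?_, by rw [hrowp, hv]; simp⟩
      refine List.mem_iff_getElem.mpr ⟨p, by rw [List.length_zip]; omega, List.getElem_zip ..⟩
    have hik : (i : Nat) < key.length := by have := i.isLt; omega
    have hjk : (j : Nat) < key.length := by have := j.isLt; omega
    have hi : key[(i : Nat)] = pvKeyOf fractions key (fractions[(i : Nat)]) :=
      hpt _ (hmemZ i i.isLt rfl)
    have hj : key[(j : Nat)] = pvKeyOf fractions key (fractions[(j : Nat)]) :=
      hpt _ (hmemZ j j.isLt hrow.symm)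
    have : key[(i : Nat)] = key[(j : Nat)] := by rw [hi, hj, hrow]
    exact hkne (by rw [List.getElem?_eq_getElem hik, List.getElem?_eq_getElem hjk, this])
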